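-- pv_equiv track=rewrite | github.com/damn-ice/dsa-practice | greedy_algorithm.py | find_ample_city
-- ===== SOURCE A (Python) =====
-- from collections import namedtuple
--
-- CityAndRemainGas = namedtuple("CityAndRemainGas", ("city", "remaining_gallons"))
--
-- def find_ample_city(gallons: list[int], distances: list[int]):
--     """The city with the minimum gallons on entry is the ideal starting point"""
--     MPG = 20
--     remaining_gallons = 0
--
--     # It's okay to start from 0 gallons as the remaining gas will end in 0...
--     # Hence if it doesn't go below zero position 0 is the ideal starting point...
--     city_remaining_gallons_pair = CityAndRemainGas(0, 0)
--     num_cities = len(gallons)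
--
--     for i in range(1, num_cities):
--         remaining_gallons += gallons[i - 1] - distances[i - 1] // MPG
--         if remaining_gallons < city_remaining_gallons_pair.remaining_gallons:
--             city_remaining_gallons_pair = CityAndRemainGas(i, remaining_gallons)
--
--     return city_remaining_gallons_pair.city
-- ===== SOURCE B (Python) =====
-- def find_ample_city(gallons: list[int], distances: list[int]):
--     """Two-pass version: build the full prefix fuel balance list, then return
--     the first index of its minimum (the ideal starting city)."""
--     MPG = 20
--     prefix = [0]
--     for i in range(1, len(gallons)):
--         prefix.append(prefix[-1] + gallons[i - 1] - distances[i - 1] // MPG)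
--     return min(range(len(prefix)), key=lambda i: prefix[i])
-- ===== Notes on version B (the rewrite author's own statement) =====
-- stated objective: alternative
-- what changed: Replaces A's single pass with online argmin tracking in a namedtuple by a two-pass decomposition: first materialise the full prefix fuel-balance list, then take the first index of its minimum with min over range.
import Mathlib
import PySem

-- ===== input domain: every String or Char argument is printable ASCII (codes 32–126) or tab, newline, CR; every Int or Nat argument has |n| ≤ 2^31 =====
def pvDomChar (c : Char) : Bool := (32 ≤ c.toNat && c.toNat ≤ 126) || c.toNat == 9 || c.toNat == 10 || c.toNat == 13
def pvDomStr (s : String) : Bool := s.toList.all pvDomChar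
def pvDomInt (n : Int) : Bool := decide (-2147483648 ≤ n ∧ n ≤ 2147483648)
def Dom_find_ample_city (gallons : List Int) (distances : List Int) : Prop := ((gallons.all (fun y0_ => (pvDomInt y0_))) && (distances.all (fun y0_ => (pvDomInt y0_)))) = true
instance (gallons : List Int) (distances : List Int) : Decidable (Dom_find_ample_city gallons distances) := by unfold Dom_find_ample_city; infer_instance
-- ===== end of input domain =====

-- B replaces A's one-pass online argmin by a two-pass decomposition (build prefix list, then first argmin); objective: alternative, same cost.

-- ===== PORT A =====
-- state = (city, remaining_gallons, best city's remaining_gallons)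
def find_ample_city (gallons : List Int) (distances : List Int) : Int :=
  let num_cities : Int := gallons.length
  let st := (PySem.List.pyRange 1 num_cities 1).foldl
    (fun (st : Int × Int × Int) i =>
      let rem := st.2.1 + PySem.List.pyGetD gallons (i - 1) 0
        - PySem.Int.floordiv (PySem.List.pyGetD distances (i - 1) 0) 20
      if rem < st.2.2 then (i, rem, rem) else (st.1, rem, st.2.2))
    (0, 0, 0)
  st.1

-- ===== PORT B =====
def find_ample_city_alt (gallons : List Int) (distances : List Int) : Int :=
  let pre := (PySem.List.pyRange 1 (gallons.length : Int) 1).foldl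
    (fun acc i => acc ++ [PySem.List.pyGetD acc (-1) 0 + PySem.List.pyGetD gallons (i - 1) 0
      - PySem.Int.floordiv (PySem.List.pyGetD distances (i - 1) 0) 20]) [0]
  ((PySem.List.min? (PySem.List.pyRange 0 (pre.length : Int) 1)
    (fun i => PySem.List.pyGetD pre i 0)).getD 0)

-- ===== PRECONDITION & SPEC =====
-- Pre_ excludes exactly the inputs where Python A raises IndexError: distances shorter than len(gallons) - 1.
def Pre_find_ample_city (gallons : List Int) (distances : List Int) : Prop :=
  gallons.length ≤ distances.length + 1
instance (gallons : List Int) (distances : List Int) : Decidable (Pre_find_ample_city gallons distances) := by unfold Pre_find_ample_city; infer_instance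
def pvWitness_find_ample_city : List Int × List Int := ([1, 2, 3], [20, 45, 10])

def Spec_find_ample_city (gallons : List Int) (distances : List Int) (out : Int) : Prop := out = find_ample_city_alt gallons distances
instance (gallons : List Int) (distances : List Int) (out : Int) : Decidable (Spec_find_ample_city gallons distances out) := by unfold Spec_find_ample_city; infer_instance

-- ===== CLAIM (what is proved, stated in full; the proofs are below) =====
def Claim_equal_find_ample_city : Prop := ∀ (gallons : List Int) (distances : List Int), Dom_find_ample_city gallons distances → Pre_find_ample_city gallons distances → Spec_find_ample_city gallons distances (find_ample_city gallons distances)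

-- ===== LEMMAS AND PROOFS =====

-- the net fuel gained leaving city j
def pvStep (gallons distances : List Int) (j : Nat) : Int :=
  gallons.getD j 0 - PySem.Int.floordiv (distances.getD j 0) 20

-- prefix fuel balance on entering city k
def pvPref (gallons distances : List Int) : Nat → Int
  | 0 => 0
  | k + 1 => pvPref gallons distances k + pvStep gallons distances k

-- (first argmin city, its prefix value) after considering cities 0..m
def pvCB (gallons distances : List Int) : Nat → Nat × Int
  | 0 => (0, 0)
  | m + 1 =>
    if pvPref gallons distances (m + 1) < (pvCB gallons distances m).2
    then (m + 1, pvPref gallons distances (m + 1)) else pvCB gallons distances m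

theorem pvCB_spec (g d : List Int) (m : Nat) :
    (pvCB g d m).2 = pvPref g d ((pvCB g d m).1) ∧ (pvCB g d m).1 ≤ m := by
  induction m with
  | zero => simp [pvCB, pvPref]
  | succ m ih =>
    simp only [pvCB]
    split_ifs with h
    · simp
    · exact ⟨ih.1, Nat.le_succ_of_le ih.2⟩

theorem pvA_fold (g d : List Int) (m : Nat) :
    (List.range m).foldl
      (fun (st : Int × Int × Int) (j : Nat) =>
        let rem := st.2.1 + PySem.List.pyGetD g ((1 + (j : Int)) - 1) 0
          - PySem.Int.floordiv (PySem.List.pyGetD d ((1 + (j : Int)) - 1) 0) 20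
        if rem < st.2.2 then (1 + (j : Int), rem, rem) else (st.1, rem, st.2.2))
      (0, 0, 0)
    = (((pvCB g d m).1 : Int), pvPref g d m, (pvCB g d m).2) := by
  induction m with
  | zero => simp [pvCB, pvPref]
  | succ m ih =>
    rw [List.range_succ, List.foldl_append, ih]
    have hi : (1 + (m : Int)) - 1 = (m : Int) := by omega
    simp only [List.foldl_cons, List.foldl_nil, hi, PySem.List.pyGetD_natCast]
    have hstep : pvPref g d m + g.getD m 0 - PySem.Int.floordiv (d.getD m 0) 20
        = pvPref g d (m + 1) := by simp [pvPref, pvStep]; ring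
    rw [hstep]
    simp only [pvCB]
    split_ifs with h
    · simp [Prod.ext_iff]; omega
    · simp [Prod.ext_iff]

theorem pvB_fold (g d : List Int) (m : Nat) :
    (List.range m).foldl
      (fun (acc : List Int) (j : Nat) => acc ++ [PySem.List.pyGetD acc (-1) 0 + PySem.List.pyGetD g ((1 + (j : Int)) - 1) 0
        - PySem.Int.floordiv (PySem.List.pyGetD d ((1 + (j : Int)) - 1) 0) 20]) [0]
    = (List.range (m + 1)).map (pvPref g d) := by
  induction m with
  | zero => simp [pvPref]
  | succ m ih =>
    rw [List.range_succ, List.foldl_append, ih]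
    have hlast : (List.range (m + 1)).map (pvPref g d)
        = (List.range m).map (pvPref g d) ++ [pvPref g d m] := by
      rw [List.range_succ, List.map_append]; rfl
    have hi : (1 + (m : Int)) - 1 = (m : Int) := by omega
    rw [List.range_succ (n := m + 1), List.map_append]
    simp only [List.foldl_cons, List.foldl_nil, hi, hlast,
      PySem.List.pyGetD_neg_one_append_singleton, PySem.List.pyGetD_natCast]
    simp [pvPref, pvStep]
    ring

theorem pvMin_fold (g d : List Int) (N m : Nat) (hm : m < N) :
    PySem.List.min? ((List.range (m + 1)).map (fun (k : Nat) => (k : Int)))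
      (fun i => PySem.List.pyGetD ((List.range N).map (pvPref g d)) i 0)
    = some (((pvCB g d m).1 : Int)) := by
  have hkey : ∀ k : Nat, k < N →
      PySem.List.pyGetD ((List.range N).map (pvPref g d)) (k : Int) 0 = pvPref g d k := by
    intro k hk
    rw [PySem.List.pyGetD_natCast, List.getD_eq_getElem?_getD]
    simp [hk]
  unfold PySem.List.min?
  induction m with
  | zero => simp
  | succ m ih =>
    have hmN : m < N := Nat.lt_of_succ_lt hm
    rw [List.range_succ (n := m + 1), List.map_append, List.foldl_append, ih hmN]
    have hc := pvCB_spec g d m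
    simp only [List.map_cons, List.map_nil, List.foldl_cons, List.foldl_nil]
    simp only [hkey (m + 1) hm, hkey ((pvCB g d m).1) (lt_of_le_of_lt hc.2 hmN), ← hc.1]
    simp only [pvCB]
    split_ifs with h
    · simp
    · simp

theorem pvRange1 (n : Nat) :
    PySem.List.pyRange 1 (n : Int) 1 = (List.range (n - 1)).map (fun (k : Nat) => 1 + (k : Int)) := by
  rw [PySem.List.pyRange_one]
  have h : ((n : Int) - 1).toNat = n - 1 := by omega
  rw [h]

-- ===== VERDICT (by name: the statement is the Claim_ definition above) =====
theorem find_ample_city_spec : Claim_equal_find_ample_city := by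
  intro gallons distances _ _
  unfold Spec_find_ample_city
  dsimp only [find_ample_city, find_ample_city_alt]
  rw [pvRange1, List.foldl_map, List.foldl_map, pvA_fold, pvB_fold]
  simp only [List.length_map, List.length_range]
  rw [PySem.List.pyRange_zero_nat]
  rw [pvMin_fold gallons distances (gallons.length - 1 + 1) (gallons.length - 1)
    (Nat.lt_succ_self _)]
  rfl
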